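-- pv_equiv track=rewrite | github.com/CristianNorga/kc_connecta_game | list_utils.py | find_streak
-- ===== SOURCE A (Python) =====
-- def find_streak(list, needle, n):
--     if n < 1:
--         return False
--
--     current_streak = 0
--     for item in list:
--         if item == needle:
--             current_streak += 1
--             if current_streak >= n:
--                 return True
--         else:
--             current_streak = 0
--
--     return False
-- ===== SOURCE B (Python) =====
-- def find_streak(list, needle, n):
--     if n < 1:
--         return False
--     i, L = 0, len(list)
--     while i < L:
--         if list[i] != needle:
--             i += 1
--             continue
--         j = i + 1
--         while j < L and list[j] == needle:
--             j += 1
--         if j - i >= n: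
--             return True
--         i = j
--     return False
-- ===== Notes on version B (the rewrite author's own statement) =====
-- stated objective: alternative
-- what changed: Replaced the running-counter/reset scan with a run-based scan: jump to each needle, measure the whole maximal run of consecutive needles at once, and compare the run length with n.
import Mathlib
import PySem

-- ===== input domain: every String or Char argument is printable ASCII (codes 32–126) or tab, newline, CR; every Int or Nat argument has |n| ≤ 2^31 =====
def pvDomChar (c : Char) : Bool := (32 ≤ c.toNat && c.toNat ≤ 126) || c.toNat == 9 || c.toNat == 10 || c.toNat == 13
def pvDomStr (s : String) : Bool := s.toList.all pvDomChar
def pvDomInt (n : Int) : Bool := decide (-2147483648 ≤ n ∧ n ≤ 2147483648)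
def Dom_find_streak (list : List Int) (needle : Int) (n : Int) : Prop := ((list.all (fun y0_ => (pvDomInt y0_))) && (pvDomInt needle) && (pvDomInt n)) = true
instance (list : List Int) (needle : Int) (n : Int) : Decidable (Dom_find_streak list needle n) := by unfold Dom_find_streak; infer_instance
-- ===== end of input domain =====

-- B replaces A's running-counter/reset scan by a run-based scan (measure each maximal
-- run of consecutive needles at once); alternative decomposition, same cost.

-- ===== PORT A =====
-- the for-loop with the running streak counter and early return
def find_streak_loopA (needle n : Int) : List Int → Int → Bool
  | [], _ => false
  | item :: rest, c =>
      if item = needle then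
        if c + 1 ≥ n then true else find_streak_loopA needle n rest (c + 1)
      else
        find_streak_loopA needle n rest 0

def find_streak (list : List Int) (needle : Int) (n : Int) : Bool :=
  if n < 1 then false else find_streak_loopA needle n list 0

-- ===== PORT B =====
-- outer while: skip non-needles; at a needle, the inner while walks the whole run
-- (takeWhile = the elements the inner while passes, dropWhile = where i lands next)
def find_streak_runsB (needle n : Int) : List Int → Bool
  | [] => false
  | x :: xs =>
      if x ≠ needle then find_streak_runsB needle n xs
      else if ((1 + (xs.takeWhile (· == needle)).length : Int) ≥ n) then true
      else find_streak_runsB needle n (xs.dropWhile (· == needle))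
termination_by l => l.length
decreasing_by
  · simp
  · have := List.length_dropWhile_le (p := (· == needle)) (l := xs)
    simp
    omega

def find_streak_alt (list : List Int) (needle : Int) (n : Int) : Bool :=
  if n < 1 then false else find_streak_runsB needle n list

-- ===== PRECONDITION & SPEC =====
def Spec_find_streak (list : List Int) (needle : Int) (n : Int) (out : Bool) : Prop := out = find_streak_alt list needle n
instance (list : List Int) (needle : Int) (n : Int) (out : Bool) : Decidable (Spec_find_streak list needle n out) := by unfold Spec_find_streak; infer_instance

-- ===== CLAIM (what is proved, stated in full; the proofs are below) =====
def Claim_equal_find_streak : Prop := ∀ (list : List Int) (needle : Int) (n : Int), Dom_find_streak list needle n → Spec_find_streak list needle n (find_streak list needle n)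

-- ===== LEMMAS AND PROOFS =====

-- after the loop counter resets (or at the very start), a leading run of needles of
-- length t either completes the streak or is consumed with the counter at c + t.length
theorem loopA_needle_run (needle n : Int) (t d : List Int)
    (ht : ∀ y ∈ t, y = needle) (c : Int) (hc : c < n) :
    find_streak_loopA needle n (t ++ d) c =
      if c + (t.length : Int) ≥ n then true
      else find_streak_loopA needle n d (c + t.length) := by
  induction t generalizing c with
  | nil => simp [hc.not_ge]
  | cons x t ih =>
      have hx : x = needle := ht x (by simp)
      by_cases h1 : c + 1 ≥ n
      · simp [find_streak_loopA, hx, h1]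
        left; omega
      · have ih' := ih (fun y hy => ht y (by simp [hy])) (c + 1) (by omega)
        simp only [List.cons_append, find_streak_loopA, hx, if_true,
          if_neg h1]
        rw [ih', List.length_cons]
        push_cast
        have e : c + 1 + (t.length : Int) = c + ((t.length : Int) + 1) := by ring
        rw [e]

theorem dropWhile_head_not (needle : Int) (l : List Int) :
    (l.dropWhile (· == needle)) = [] ∨
      ∃ y ys, l.dropWhile (· == needle) = y :: ys ∧ y ≠ needle := by
  induction l with
  | nil => left; rfl
  | cons x xs ih =>
      by_cases hx : x = needle
      · simpa [List.dropWhile, hx] using ih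
      · right; exact ⟨x, xs, by simp [hx], hx⟩

-- when the next element is not a needle (or the list ends), the counter value is irrelevant
theorem loopA_reset (needle n : Int) (d : List Int)
    (hd : d = [] ∨ ∃ y ys, d = y :: ys ∧ y ≠ needle) (c : Int) :
    find_streak_loopA needle n d c = find_streak_loopA needle n d 0 := by
  rcases hd with h | ⟨y, ys, h, hy⟩ <;> subst h
  · rfl
  · simp [find_streak_loopA, hy]

theorem loopA_eq_runsB (needle n : Int) (hn : 1 ≤ n) :
    ∀ (l : List Int), find_streak_loopA needle n l 0 = find_streak_runsB needle n l := by
  intro l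
  induction hl : l.length using Nat.strong_induction_on generalizing l with
  | _ k ih =>
    cases l with
    | nil => simp [find_streak_loopA, find_streak_runsB]
    | cons x xs =>
      subst hl
      by_cases hx : x = needle
      · subst hx
        set t := xs.takeWhile (· == x) with ht
        set d := xs.dropWhile (· == x) with hd
        have hxs : (x :: t) ++ d = x :: xs := by
          simp [ht, hd, List.takeWhile_append_dropWhile]
        have hall : ∀ y ∈ x :: t, y = x := by
          intro y hy
          rcases List.mem_cons.mp hy with h | h
          · exact h
          · simpa using List.mem_takeWhile_imp h
        have hrun := loopA_needle_run x n (x :: t) d hall 0 (by omega)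
        rw [hxs] at hrun
        have hdlen : d.length ≤ xs.length := List.length_dropWhile_le _ _
        have hihd := ih d.length (by simp; omega) d rfl
        have hreset := loopA_reset x n d (dropWhile_head_not x xs) ((0 : Int) + (x :: t).length)
        rw [find_streak_runsB]
        simp only [ne_eq, not_true_eq_false, if_false, ← ht, ← hd] at *
        rw [hrun, hreset, hihd]
        have : ((0 : Int) + ((x :: t).length : Int) ≥ n) ↔ ((1 + (t.length : Int)) ≥ n) := by
          simp
          omega
        simp only [List.length_cons] at this ⊢
        split_ifs with h1 h2 h2 <;> first | rfl | (exfalso; push_cast at *; omega)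
      · rw [find_streak_runsB]
        simp only [ne_eq, hx, not_false_eq_true, if_true]
        have := ih xs.length (by simp) xs rfl
        simpa [find_streak_loopA, hx] using this

-- ===== VERDICT (by name: the statement is the Claim_ definition above) =====
theorem find_streak_spec : Claim_equal_find_streak := by
  intro list needle n _
  unfold Spec_find_streak find_streak find_streak_alt
  by_cases h : n < 1
  · simp [h]
  · simp [h]
    exact loopA_eq_runsB needle n (by omega) list
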